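-- pv_equiv track=rewrite | github.com/iHeadWater/dailyinfo | scripts/push_to_discord.py | _source_name_from_filename
-- ===== SOURCE A (Python) =====
-- def _source_name_from_filename(filename, sources):
--     """Resolve a briefing filename back to a configured source name."""
--     for source in sorted(
--         sources, key=lambda src: len(src.get("name", "")), reverse=True
--     ):
--         name = source.get("name", "")
--         if filename.startswith(f"{name}_briefing_"):
--             return name
--     return filename.split("_briefing_", 1)[0]
-- ===== SOURCE B (Python) =====
-- def _source_name_from_filename(filename, sources):
--     """Resolve a briefing filename back to a configured source name.
--
--     Instead of sorting the sources by name length, scan the candidate split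
--     positions of the filename itself from right to left: the rightmost position
--     where "_briefing_" occurs and whose prefix is a configured source name is
--     exactly the longest matching name (equal-length matching names are the same
--     prefix, so the original stable-sort tie-break is irrelevant)."""
--     needle = "_briefing_"
--     names = {src.get("name", "") for src in sources}
--     for i in range(len(filename) - len(needle), -1, -1):
--         if filename[i:i + len(needle)] == needle and filename[:i] in names:
--             return filename[:i]
--     return filename.split(needle, 1)[0]
-- ===== Notes on version B (the rewrite author's own statement) =====
-- stated objective: alternative
-- what changed: Instead of sorting the sources by descending name length and testing each name against the filename, B builds the set of configured names once and scans the filename's own '_briefing_' split positions right to left, returning the first (i.e. longest) prefix that is a configured name; equal-length matching names are the same prefix, so the stable-sort tie-break is preserved automatically.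
import Mathlib
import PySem

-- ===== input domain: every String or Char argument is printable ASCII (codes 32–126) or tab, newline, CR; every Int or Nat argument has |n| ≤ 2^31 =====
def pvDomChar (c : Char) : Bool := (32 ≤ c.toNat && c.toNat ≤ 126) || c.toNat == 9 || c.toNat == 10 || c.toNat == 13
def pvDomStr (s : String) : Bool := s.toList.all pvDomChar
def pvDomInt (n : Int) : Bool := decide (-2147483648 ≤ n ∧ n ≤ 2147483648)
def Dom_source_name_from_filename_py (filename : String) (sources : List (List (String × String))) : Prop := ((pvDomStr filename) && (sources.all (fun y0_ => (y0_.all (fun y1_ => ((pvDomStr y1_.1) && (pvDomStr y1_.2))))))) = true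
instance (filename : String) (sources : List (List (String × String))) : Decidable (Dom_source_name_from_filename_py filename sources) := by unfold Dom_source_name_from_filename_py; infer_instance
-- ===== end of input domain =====

-- B drops A's stable length-descending sort over the sources: it scans the filename's own
-- split positions right to left (set of configured names built once) — the rightmost
-- "_briefing_" position whose prefix is a configured name IS the longest matching name.


-- ===== PORT A =====
-- src.get("name", "") on the association list (first match)
def pvNameA (src : List (String × String)) : String :=
  (((src.find? (fun p => p.1 == "name")).map Prod.snd).getD "")

-- A's for-loop over the sorted sources, with early return
def pvLoopA (filename : String) : List (List (String × String)) → Option String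
  | [] => none
  | src :: rest =>
    let name := pvNameA src
    if PySem.Str.startswith filename (name ++ "_briefing_") then some name
    else pvLoopA filename rest

def source_name_from_filename_py (filename : String) (sources : List (List (String × String))) : String :=
  match pvLoopA filename
      (PySem.List.sorted sources (fun src => PySem.Str.len (pvNameA src)) true) with
  | some name => name
  | none => ((PySem.Str.splitMax? filename "_briefing_" 1).getD []).headD ""

-- ===== PORT B =====
-- needle = "_briefing_"
def pvNeedleB : List Char := "_briefing_".toList

-- names = {src.get("name", "") for src in sources}, kept as code-point lists
def pvNamesB (sources : List (List (String × String))) : PySem.Set (List Char) :=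
  PySem.Set.ofList (sources.map (fun src =>
    ((((src.find? (fun p => p.1 == "name")).map Prod.snd).getD "").toList)))

-- 'for i in range(len(filename) - len(needle), -1, -1): …' with early return
def pvScanB (cs : List Char) (names : PySem.Set (List Char)) : List Int → Option (List Char)
  | [] => none
  | i :: rest =>
    if (PySem.List.slice cs (some i) (some (i + (pvNeedleB.length : Int))) == pvNeedleB)
        && PySem.Set.contains names (PySem.List.slice cs none (some i)) then
      some (PySem.List.slice cs none (some i))
    else pvScanB cs names rest

def source_name_from_filename_py_alt (filename : String) (sources : List (List (String × String))) : String :=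
  match pvScanB filename.toList (pvNamesB sources)
      (PySem.List.pyRange ((filename.toList.length : Int) - (pvNeedleB.length : Int)) (-1) (-1)) with
  | some pre => String.ofList pre
  | none => ((PySem.Str.splitMax? filename "_briefing_" 1).getD []).headD ""

-- ===== PRECONDITION & SPEC =====
def Spec_source_name_from_filename_py (filename : String) (sources : List (List (String × String))) (out : String) : Prop := out = source_name_from_filename_py_alt filename sources
instance (filename : String) (sources : List (List (String × String))) (out : String) : Decidable (Spec_source_name_from_filename_py filename sources out) := by unfold Spec_source_name_from_filename_py; infer_instance

-- ===== CLAIM (what is proved, stated in full; the proofs are below) =====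
def Claim_equal_source_name_from_filename_py : Prop := ∀ (filename : String) (sources : List (List (String × String))), Dom_source_name_from_filename_py filename sources → Spec_source_name_from_filename_py filename sources (source_name_from_filename_py filename sources)

-- ===== LEMMAS AND PROOFS =====

-- abbreviations used only in the proofs
def pvP (filename : String) (src : List (String × String)) : Bool :=
  PySem.Str.startswith filename (pvNameA src ++ "_briefing_")

def pvKey (src : List (String × String)) : Int := PySem.Str.len (pvNameA src)

def pvCondB (cs : List Char) (names : PySem.Set (List Char)) (i : Int) : Bool :=
  (PySem.List.slice cs (some i) (some (i + (pvNeedleB.length : Int))) == pvNeedleB)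
    && PySem.Set.contains names (PySem.List.slice cs none (some i))

-- A's loop is find? on the list, mapped through the name
theorem pvLoopA_eq_find? (filename : String) (xs : List (List (String × String))) :
    pvLoopA filename xs = (xs.find? (pvP filename)).map pvNameA := by
  induction xs with
  | nil => rfl
  | cons x xs ih =>
    have hx : PySem.Str.startswith filename (pvNameA x ++ "_briefing_") = pvP filename x := rfl
    simp only [pvLoopA, List.find?, hx]
    cases h : pvP filename x
    · simpa using ih
    · simp

-- ---- the reverse-sorted list is pairwise key-descending ----
theorem insertBy_split (key : List (String × String) → Int) (x : List (String × String))
    (acc : List (List (String × String))) :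
    PySem.List.insertBy (fun a b => decide (key b < key a)) x acc =
      acc.takeWhile (fun y => decide (key x ≤ key y)) ++
        x :: acc.dropWhile (fun y => decide (key x ≤ key y)) := by
  induction acc with
  | nil => rfl
  | cons y acc ih =>
    simp only [PySem.List.insertBy, List.takeWhile, List.dropWhile]
    by_cases h : key y < key x
    · simp [h, not_le.mpr h]
    · have h' : key x ≤ key y := not_lt.mp h
      simp [h, h', ih]

theorem dropWhile_lt (key : List (String × String) → Int) (x : List (String × String))
    (acc : List (List (String × String)))
    (hs : acc.Pairwise (fun a b => key b ≤ key a)) :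
    ∀ y ∈ acc.dropWhile (fun y => decide (key x ≤ key y)), key y < key x := by
  induction acc with
  | nil => simp
  | cons z acc ih =>
    simp only [List.dropWhile]
    rcases List.pairwise_cons.mp hs with ⟨hz, hacc⟩
    by_cases h : key x ≤ key z
    · simp only [h, decide_true]
      exact ih hacc
    · simp only [h, decide_false]
      intro y hy
      rcases List.mem_cons.mp hy with rfl | hy
      · omega
      · have := hz y hy; omega

theorem takeWhile_ge (key : List (String × String) → Int) (x : List (String × String))
    (acc : List (List (String × String))) :
    ∀ y ∈ acc.takeWhile (fun y => decide (key x ≤ key y)), key x ≤ key y := by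
  intro y hy
  have := List.mem_takeWhile_imp hy
  simpa using this

theorem pairwise_insertBy (key : List (String × String) → Int) (x : List (String × String))
    (acc : List (List (String × String)))
    (hs : acc.Pairwise (fun a b => key b ≤ key a)) :
    (PySem.List.insertBy (fun a b => decide (key b < key a)) x acc).Pairwise
      (fun a b => key b ≤ key a) := by
  rw [insertBy_split]
  have htd : acc.takeWhile (fun y => decide (key x ≤ key y)) ++
      acc.dropWhile (fun y => decide (key x ≤ key y)) = acc := List.takeWhile_append_dropWhile
  have hperm : (acc.takeWhile (fun y => decide (key x ≤ key y)) ++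
      acc.dropWhile (fun y => decide (key x ≤ key y))).Pairwise (fun a b => key b ≤ key a) := by
    rw [htd]; exact hs
  rw [List.pairwise_append] at hperm
  rcases hperm with ⟨ht, hd, htd2⟩
  rw [List.pairwise_append]
  refine ⟨ht, ?_, ?_⟩
  · rw [List.pairwise_cons]
    exact ⟨fun y hy => le_of_lt (dropWhile_lt key x acc hs y hy), hd⟩
  · intro a ha b hb
    rcases List.mem_cons.mp hb with hb' | hb'
    · rw [hb']; exact takeWhile_ge key x acc a ha
    · exact htd2 a ha b hb'

theorem pairwise_sorted_rev (sources : List (List (String × String))) :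
    (PySem.List.sorted sources pvKey true).Pairwise (fun a b => pvKey b ≤ pvKey a) := by
  rw [PySem.List.sorted_rev_eq_foldl_insertBy]
  have aux : ∀ (xs acc : List (List (String × String))),
      acc.Pairwise (fun a b => pvKey b ≤ pvKey a) →
      (xs.foldl (fun acc x => PySem.List.insertBy (fun a b => decide (pvKey b < pvKey a)) x acc)
        acc).Pairwise (fun a b => pvKey b ≤ pvKey a) := by
    intro xs
    induction xs with
    | nil => intro acc h; exact h
    | cons x xs ih => intro acc h; exact ih _ (pairwise_insertBy pvKey x acc h)
  exact aux sources [] (by simp)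

-- on a key-descending list, find? returns a satisfier of maximal key
theorem find?_desc_max (f : String) (l : List (List (String × String)))
    (hs : l.Pairwise (fun a b => pvKey b ≤ pvKey a))
    (src : List (String × String)) (hf : l.find? (pvP f) = some src) :
    ∀ t ∈ l, pvP f t = true → pvKey t ≤ pvKey src := by
  induction l with
  | nil => simp at hf
  | cons x xs ih =>
    rcases List.pairwise_cons.mp hs with ⟨hx, hxs⟩
    intro t ht hpt
    by_cases h : pvP f x = true
    · rw [List.find?_cons_of_pos h] at hf
      cases hf
      rcases List.mem_cons.mp ht with rfl | ht'
      · exact le_refl _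
      · exact hx t ht'
    · rw [List.find?_cons_of_neg (by simpa using h)] at hf
      rcases List.mem_cons.mp ht with rfl | ht'
      · exact absurd hpt h
      · exact ih hxs hf t ht' hpt

-- ---- character-level characterisation of a match ----
theorem pvP_iff (filename : String) (src : List (String × String)) :
    pvP filename src = true ↔
      (pvNameA src).toList ++ pvNeedleB <+: filename.toList := by
  rw [pvP, PySem.Str.startswith_eq, PySem.Chars.startswith_iff, String.toList_append]
  rfl

theorem append_prefix_iff (n m cs : List Char) :
    n ++ m <+: cs ↔ (cs.take n.length = n ∧ m <+: cs.drop n.length) := by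
  constructor
  · rintro ⟨t, ht⟩
    subst ht
    constructor
    · rw [List.append_assoc, List.take_left]
    · rw [List.append_assoc, List.drop_left]
      exact ⟨t, rfl⟩
  · rintro ⟨h1, ⟨u, hu⟩⟩
    refine ⟨u, ?_⟩
    calc n ++ m ++ u = cs.take n.length ++ (m ++ u) := by rw [h1, List.append_assoc]
    _ = cs.take n.length ++ cs.drop n.length := by rw [hu]
    _ = cs := List.take_append_drop _ _

-- the loop guard at a nonnegative index k, in terms of prefixes and membership
theorem pvCondB_iff (cs : List Char) (sources : List (List (String × String))) (k : Nat) :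
    pvCondB cs (pvNamesB sources) (k : Int) = true ↔
      (pvNeedleB <+: cs.drop k ∧
        cs.take k ∈ sources.map (fun src => (pvNameA src).toList)) := by
  have hslice : PySem.List.slice cs (some (k : Int)) (some ((k : Int) + (pvNeedleB.length : Int)))
      = (cs.drop k).take pvNeedleB.length := PySem.List.slice_natCast_add cs k pvNeedleB.length
  have htake : PySem.List.slice cs none (some (k : Int)) = cs.take k :=
    PySem.List.slice_to_natCast cs k
  rw [pvCondB, hslice, htake, Bool.and_eq_true, beq_iff_eq]
  constructor
  · rintro ⟨h1, h2⟩
    refine ⟨?_, ?_⟩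
    · rw [List.prefix_iff_eq_take]
      exact h1.symm
    · have : PySem.Set.contains (pvNamesB sources) (cs.take k) = true := h2
      rw [PySem.Set.contains, List.contains_iff_mem, pvNamesB, PySem.Set.mem_ofList] at this
      simpa [pvNameA] using this
  · rintro ⟨h1, h2⟩
    refine ⟨?_, ?_⟩
    · rw [List.prefix_iff_eq_take] at h1
      exact h1.symm
    · show PySem.Set.contains (pvNamesB sources) (cs.take k) = true
      rw [PySem.Set.contains, List.contains_iff_mem, pvNamesB, PySem.Set.mem_ofList]
      simpa [pvNameA] using h2

-- a guard holding at index i yields a matching source of name length i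
theorem cond_gives_match (filename : String) (sources : List (List (String × String)))
    (i : Int) (h0 : 0 ≤ i) (hi : i ≤ (filename.toList.length : Int) - (pvNeedleB.length : Int))
    (hc : pvCondB filename.toList (pvNamesB sources) i = true) :
    ∃ t ∈ sources, pvP filename t = true ∧ pvKey t = i := by
  have hi' : i = (i.toNat : Int) := (Int.toNat_of_nonneg h0).symm
  rw [hi'] at hc
  rcases (pvCondB_iff filename.toList sources i.toNat).mp hc with ⟨hpre, hmem⟩
  rcases List.mem_map.mp hmem with ⟨t, htmem, htname⟩
  have hlen : i.toNat + pvNeedleB.length ≤ filename.toList.length := by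
    have h := hpre.length_le
    rw [List.length_drop] at h
    omega
  have htakelen : (filename.toList.take i.toNat).length = i.toNat := by
    rw [List.length_take]
    omega
  have hnamelen : (pvNameA t).toList.length = i.toNat := by rw [htname, htakelen]
  refine ⟨t, htmem, ?_, ?_⟩
  · rw [pvP_iff, append_prefix_iff, hnamelen, htname]
    exact ⟨rfl, hpre⟩
  · rw [pvKey, PySem.Str.len_eq, hnamelen]
    omega

-- a matching source of name length K makes the guard hold at K
theorem match_gives_cond (filename : String) (sources : List (List (String × String)))
    (t : List (String × String)) (htmem : t ∈ sources) (hpt : pvP filename t = true) :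
    pvCondB filename.toList (pvNamesB sources) ((pvNameA t).toList.length : Int) = true ∧
      filename.toList.take (pvNameA t).toList.length = (pvNameA t).toList ∧
      ((pvNameA t).toList.length : Int) ≤
        (filename.toList.length : Int) - (pvNeedleB.length : Int) := by
  rw [pvP_iff, append_prefix_iff] at hpt
  rcases hpt with ⟨h1, h2⟩
  have hdroplen : pvNeedleB.length ≤ (filename.toList.drop (pvNameA t).toList.length).length :=
    h2.length_le
  have h10 : pvNeedleB.length = 10 := by decide
  have hKle : (pvNameA t).toList.length + pvNeedleB.length ≤ filename.toList.length := by
    rw [List.length_drop, h10] at hdroplen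
    omega
  refine ⟨?_, h1, by rw [h10] at hKle ⊢; push_cast; omega⟩
  rw [pvCondB_iff]
  exact ⟨h2, by rw [h1]; exact List.mem_map_of_mem htmem⟩

-- ---- scan structure lemmas ----
theorem pvScanB_cons_true (cs : List Char) (names : PySem.Set (List Char)) (i : Int)
    (l : List Int) (h : pvCondB cs names i = true) :
    pvScanB cs names (i :: l) = some (PySem.List.slice cs none (some i)) := by
  have h' : ((PySem.List.slice cs (some i) (some (i + (pvNeedleB.length : Int))) == pvNeedleB)
      && PySem.Set.contains names (PySem.List.slice cs none (some i))) = true := h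
  simp only [pvScanB]
  rw [if_pos h']

theorem pvScanB_append_none (cs : List Char) (names : PySem.Set (List Char))
    (l1 l2 : List Int) (h : ∀ i ∈ l1, pvCondB cs names i = false) :
    pvScanB cs names (l1 ++ l2) = pvScanB cs names l2 := by
  induction l1 with
  | nil => rfl
  | cons i l1 ih =>
    have hi : ((PySem.List.slice cs (some i) (some (i + (pvNeedleB.length : Int))) == pvNeedleB)
        && PySem.Set.contains names (PySem.List.slice cs none (some i))) = false := h i (by simp)
    simp only [List.cons_append, pvScanB]
    rw [if_neg (by rw [hi]; exact Bool.false_ne_true)]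
    exact ih (fun j hj => h j (by simp [hj]))

theorem pvScanB_none (cs : List Char) (names : PySem.Set (List Char)) (l : List Int)
    (h : ∀ i ∈ l, pvCondB cs names i = false) :
    pvScanB cs names l = none := by
  induction l with
  | nil => rfl
  | cons i l ih =>
    have hi : ((PySem.List.slice cs (some i) (some (i + (pvNeedleB.length : Int))) == pvNeedleB)
        && PySem.Set.contains names (PySem.List.slice cs none (some i))) = false := h i (by simp)
    simp only [pvScanB]
    rw [if_neg (by rw [hi]; exact Bool.false_ne_true)]
    exact ih (fun j hj => h j (by simp [hj]))

-- ===== VERDICT (by name: the statement is the Claim_ definition above) =====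
theorem source_name_from_filename_py_spec : Claim_equal_source_name_from_filename_py := by
  intro filename sources _
  show source_name_from_filename_py filename sources = source_name_from_filename_py_alt filename sources
  unfold source_name_from_filename_py source_name_from_filename_py_alt
  have hkey : (fun src => PySem.Str.len (pvNameA src)) = pvKey := rfl
  rw [hkey, pvLoopA_eq_find?]
  set a : Int := (filename.toList.length : Int) - (pvNeedleB.length : Int) with ha
  cases hf : (PySem.List.sorted sources pvKey true).find? (pvP filename) with
  | none =>
    -- no source matches: both sides fall back to the split
    have hnone : ∀ t ∈ sources, ¬ pvP filename t = true := by
      intro t ht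
      exact List.find?_eq_none.mp hf t
        (((PySem.List.sorted_perm sources pvKey true).mem_iff).mpr ht)
    have hscan : pvScanB filename.toList (pvNamesB sources)
        (PySem.List.pyRange a (-1) (-1)) = none := by
      apply pvScanB_none
      intro i hi
      rcases PySem.List.mem_pyRange_neg_one.mp hi with ⟨hlo, hhi⟩
      by_contra hc
      rw [Bool.not_eq_false] at hc
      rcases cond_gives_match filename sources i (by omega) hhi hc with ⟨t, htmem, hpt, _⟩
      exact hnone t htmem hpt
    rw [hscan]
    rfl
  | some src =>
    -- src matches with maximal name length K; the scan stops exactly at K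
    have hpsrc : pvP filename src = true := List.find?_some hf
    have hsrcmem : src ∈ sources :=
      ((PySem.List.sorted_perm sources pvKey true).mem_iff).mp (List.mem_of_find?_eq_some hf)
    have hmax : ∀ t ∈ sources, pvP filename t = true → pvKey t ≤ pvKey src := by
      intro t ht hpt
      exact find?_desc_max filename _ (pairwise_sorted_rev sources) src hf t
        (((PySem.List.sorted_perm sources pvKey true).mem_iff).mpr ht) hpt
    rcases match_gives_cond filename sources src hsrcmem hpsrc with ⟨hcond, htake, hKa⟩
    set K : Nat := (pvNameA src).toList.length with hK
    have hKkey : pvKey src = (K : Int) := by rw [pvKey, PySem.Str.len_eq]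
    -- split the countdown range at K
    have hsplit : PySem.List.pyRange a (-1) (-1) =
        (PySem.List.pyRange ((K : Int) + 1) (a + 1) 1).reverse ++
          ((K : Int) :: PySem.List.pyRange ((K : Int) - 1) (-1) (-1)) := by
      rw [PySem.List.pyRange_neg_one_eq_reverse a (-1)]
      rw [show (-1 : Int) + 1 = 0 by ring]
      rw [PySem.List.pyRange_one_append 0 ((K : Int) + 1) (a + 1) (by omega) (by omega)]
      rw [List.reverse_append]
      congr 1
      rw [← PySem.List.pyRange_neg_one_cons (by omega : (-1 : Int) < (K : Int))]
      rw [PySem.List.pyRange_neg_one_eq_reverse (K : Int) (-1)]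
      rw [show (-1 : Int) + 1 = 0 by ring]
    rw [hsplit]
    rw [pvScanB_append_none]
    · rw [pvScanB_cons_true _ _ _ _ hcond,
        PySem.List.slice_to_natCast filename.toList K, htake]
      show pvNameA src = String.ofList ((pvNameA src).toList)
      exact String.ofList_toList.symm
    · -- every position strictly above K fails the guard
      intro i hi
      rcases List.mem_reverse.mp hi with hi'
      rcases PySem.List.mem_pyRange_one.mp hi' with ⟨hlo, hhi⟩
      by_contra hc
      rw [Bool.not_eq_false] at hc
      rcases cond_gives_match filename sources i (by omega) (by omega) hc with
        ⟨t, htmem, hpt, hkeyt⟩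
      have := hmax t htmem hpt
      rw [hkeyt, hKkey] at this
      omega
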